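-- pv_equiv track=rewrite | github.com/AdamZhouSE/pythonHomework | Code/CodeRecords/2600/60723/304550.py | count
-- ===== SOURCE A (Python) =====
-- def count(array):
--     list=[]
--     for i in range(len(array)):
--         total=0
--         j=i
--         while j<len(array) and array[j]!=-1:
--             total=total+array[j]
--             j=j+1
--         list.append(total)
--     return max(list)
-- ===== SOURCE B (Python) =====
-- def count(array):
--     best = None
--     run = 0
--     for x in reversed(array):
--         run = 0 if x == -1 else run + x
--         best = run if best is None else max(best, run)
--     return best
-- ===== Notes on version B (the rewrite author's own statement) =====
-- stated objective: faster
-- what changed: Replaced the per-index rescan (for every i, walk forward summing until the next -1) by one right-to-left pass keeping a running suffix sum that resets at -1 and its maximum.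
-- outside the precondition, e.g. on count([]): A raises ValueError, B returns None
import Mathlib
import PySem

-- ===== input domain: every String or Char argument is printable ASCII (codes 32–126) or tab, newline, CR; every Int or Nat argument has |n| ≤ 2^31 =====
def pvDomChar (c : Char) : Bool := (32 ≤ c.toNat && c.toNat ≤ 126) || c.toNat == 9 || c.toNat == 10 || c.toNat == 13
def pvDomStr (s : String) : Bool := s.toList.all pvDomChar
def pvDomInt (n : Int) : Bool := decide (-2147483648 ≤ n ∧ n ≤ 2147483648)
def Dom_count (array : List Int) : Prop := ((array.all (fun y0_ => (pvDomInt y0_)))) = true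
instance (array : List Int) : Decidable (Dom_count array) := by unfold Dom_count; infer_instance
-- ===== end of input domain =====

-- B replaces A's per-index forward rescan by one right-to-left running suffix sum resetting at -1 (O(n^2) → O(n)).
-- ===== PORT A =====
-- the inner 'while j<len(array) and array[j]!=-1: total+=array[j]; j+=1'
def countInner (array : List Int) (j : Nat) (total : Int) : Int :=
  if h : j < array.length then
    if array[j] ≠ -1 then countInner array (j + 1) (total + array[j]) else total
  else total
termination_by array.length - j

def count (array : List Int) : Int :=
  let list := (List.range array.length).map (fun i => countInner array i 0)
  -- max(list): Pre_count (array ≠ []) guarantees the list is nonempty, so max? is some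
  (PySem.List.max? list (fun x => x)).getD 0

-- ===== PORT B =====
def count_alt (array : List Int) : Int :=
  let s := array.reverse.foldl (fun (s : Option Int × Int) x =>
    let run := if x = -1 then 0 else s.2 + x
    (some (match s.1 with | none => run | some b => max b run), run)) (none, 0)
  -- Python B returns None on the empty list (outside Pre_count)
  s.1.getD 0

-- ===== PRECONDITION & SPEC =====
-- Pre_ excludes the empty list, on which A's max([]) raises ValueError.
def Pre_count (array : List Int) : Prop := array ≠ []
instance (array : List Int) : Decidable (Pre_count array) := by unfold Pre_count; infer_instance
def pvWitness_count : List Int := [2, -1, 3]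

def Spec_count (array : List Int) (out : Int) : Prop := out = count_alt array
instance (array : List Int) (out : Int) : Decidable (Spec_count array out) := by unfold Spec_count; infer_instance

-- ===== CLAIM (what is proved, stated in full; the proofs are below) =====
def Claim_equal_count : Prop := ∀ (array : List Int), Dom_count array → Pre_count array → Spec_count array (count array)

-- ===== LEMMAS AND PROOFS =====

-- the run starting at each index: 0 at a -1, else the element plus the following run
def pvRuns : List Int → List Int
  | [] => []
  | x :: xs => (if x = -1 then 0 else (pvRuns xs).headD 0 + x) :: pvRuns xs

theorem pvRuns_length (l : List Int) : (pvRuns l).length = l.length := by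
  induction l with
  | nil => rfl
  | cons x xs ih => simp [pvRuns, ih]

theorem pvRuns_drop (l : List Int) (i : Nat) : pvRuns (l.drop i) = (pvRuns l).drop i := by
  induction l generalizing i with
  | nil => simp [pvRuns]
  | cons x xs ih =>
    cases i with
    | zero => rfl
    | succ n => simpa [pvRuns] using ih n

theorem countInner_eq (array : List Int) (j : Nat) (total : Int) :
    countInner array j total = total + (pvRuns (array.drop j)).headD 0 := by
  by_cases h : j < array.length
  · have hd : array.drop j = array[j] :: array.drop (j + 1) :=
      List.drop_eq_getElem_cons h
    rw [countInner]
    by_cases hx : array[j] = -1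
    · simp [h, hx, hd, pvRuns]
    · have ih := countInner_eq array (j + 1) (total + array[j])
      simp only [dif_pos h]
      rw [if_pos (show array[j] ≠ -1 from hx), ih, hd]
      simp only [pvRuns, if_neg hx, List.headD_cons]
      ring
  · have : array.drop j = [] := List.drop_eq_nil_of_le (by omega)
    rw [countInner]
    simp [h, this, pvRuns]
termination_by array.length - j

theorem map_range_eq (array : List Int) :
    (List.range array.length).map (fun i => countInner array i 0) = pvRuns array := by
  apply List.ext_getElem
  · simp [pvRuns_length]
  · intro i h1 h2
    simp only [List.getElem_map, List.getElem_range]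
    rw [countInner_eq, pvRuns_drop]
    have hi : i < (pvRuns array).length := by simpa [pvRuns_length] using h2
    rw [List.drop_eq_getElem_cons hi]
    simp [List.getElem?_eq_getElem hi]

-- max over a nonempty list built back-to-front equals the left fold of max
def pvBest : List Int → Option Int
  | [] => none
  | r :: t => some (match pvBest t with | none => r | some b => max b r)

theorem foldl_max_swap (t : List Int) (a b : Int) :
    t.foldl max (max a b) = max (t.foldl max a) b := by
  induction t generalizing a b with
  | nil => simp
  | cons c t ih =>
    simp only [List.foldl_cons]
    rw [max_right_comm, ih]

theorem pvBest_eq_foldl (t : List Int) (r : Int) :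
    pvBest (r :: t) = some (t.foldl max r) := by
  induction t generalizing r with
  | nil => rfl
  | cons y t ih =>
    simp only [pvBest, List.foldl_cons]
    have h : (match pvBest t with | none => y | some b => max b y) = t.foldl max y := by
      simpa [pvBest] using ih y
    rw [h, max_comm r y, foldl_max_swap]

theorem B_fold (l : List Int) :
    l.foldr (fun x (s : Option Int × Int) =>
        let run := if x = -1 then 0 else s.2 + x
        (some (match s.1 with | none => run | some b => max b run), run)) (none, 0)
      = (pvBest (pvRuns l), (pvRuns l).headD 0) := by
  induction l with
  | nil => rfl
  | cons x xs ih =>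
    simp only [List.foldr_cons, ih, pvRuns, pvBest]
    cases pvBest (pvRuns xs) <;> simp

-- ===== VERDICT (by name: the statement is the Claim_ definition above) =====
theorem count_spec : Claim_equal_count := by
  intro array _ hpre
  unfold Spec_count
  have hne : pvRuns array ≠ [] := by
    intro h
    have hl := pvRuns_length array
    rw [h] at hl
    exact hpre (List.length_eq_zero_iff.mp hl.symm)
  obtain ⟨r, t, hrt⟩ := List.exists_cons_of_ne_nil hne
  simp only [count, count_alt, map_range_eq, List.foldl_reverse]
  rw [B_fold, hrt, PySem.List.max?_id_cons, pvBest_eq_foldl]
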